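-- pv_equiv track=rewrite | github.com/nickmeinhold/imagineering-matrix | relay/relay_bot.py | _platform_label
-- ===== SOURCE A (Python) =====
-- def _platform_label(user_id: str) -> str:
--     """Infer the originating platform from a Matrix user ID.
--
--     Bridge puppet MXIDs contain a platform prefix (e.g. ``@_discord_123:domain``).
--     For native Matrix users we fall back to "Matrix".
--     """
--     localpart = user_id.split(":")[0].lstrip("@")
--     for prefix, name in (
--         ("_discord_", "Discord"),
--         ("_telegram_", "Telegram"),
--         ("_signal_", "Signal"),
--         ("_whatsapp_", "WhatsApp"),
--     ):
--         if localpart.startswith(prefix):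
--             return name
--     return "Matrix"
-- ===== SOURCE B (Python) =====
-- _PLATFORMS = {
--     "discord": "Discord",
--     "telegram": "Telegram",
--     "signal": "Signal",
--     "whatsapp": "WhatsApp",
-- }
--
--
-- def _platform_label(user_id: str) -> str:
--     """Infer the originating platform from a Matrix user ID (table lookup)."""
--     localpart = user_id.split(":")[0].lstrip("@")
--     if not localpart.startswith("_"):
--         return "Matrix"
--     end = localpart.find("_", 1)
--     if end == -1:
--         return "Matrix"
--     return _PLATFORMS.get(localpart[1:end], "Matrix")
-- ===== Notes on version B (the rewrite author's own statement) =====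
-- stated objective: idiomatic
-- what changed: Replaces the loop of four startswith prefix tests by locating the underscore that closes the leading platform token with str.find and looking the extracted token up in a dict, with the native-platform label as the default.
import Mathlib
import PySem

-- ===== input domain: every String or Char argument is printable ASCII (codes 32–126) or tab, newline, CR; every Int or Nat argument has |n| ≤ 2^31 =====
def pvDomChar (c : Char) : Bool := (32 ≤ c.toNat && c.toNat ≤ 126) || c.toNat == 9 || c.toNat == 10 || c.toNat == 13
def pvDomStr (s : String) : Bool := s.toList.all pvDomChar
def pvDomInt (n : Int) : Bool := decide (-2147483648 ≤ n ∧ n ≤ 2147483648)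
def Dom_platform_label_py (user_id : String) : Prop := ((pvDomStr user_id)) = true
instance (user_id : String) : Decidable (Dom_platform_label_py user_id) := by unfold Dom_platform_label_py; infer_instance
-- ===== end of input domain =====

-- B replaces A's loop of startswith tests by extracting the '_'-delimited platform token
-- and looking it up in a dict (objective: idiomatic table lookup instead of a prefix scan).

-- ===== PORT A =====
def platform_label_py (user_id : String) : String :=
  -- user_id.split(":")[0]: split with a non-empty separator always returns a non-empty list,
  -- so `getD`/`headD` never see their defaults; .lstrip("@") ported by hand as dropWhile (exact
  -- for a one-character strip set)
  let first := ((PySem.Str.split? user_id ":").getD [user_id]).headD ""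
  let localpart := String.ofList (first.toList.dropWhile (· == '@'))
  if PySem.Str.startswith localpart "_discord_" then "Discord"
  else if PySem.Str.startswith localpart "_telegram_" then "Telegram"
  else if PySem.Str.startswith localpart "_signal_" then "Signal"
  else if PySem.Str.startswith localpart "_whatsapp_" then "WhatsApp"
  else "Matrix"

-- ===== PORT B =====
def pvPlatforms : PySem.Dict String String :=
  PySem.Dict.ofList
    [("discord", "Discord"), ("telegram", "Telegram"), ("signal", "Signal"), ("whatsapp", "WhatsApp")]

def platform_label_py_alt (user_id : String) : String :=
  let first := ((PySem.Str.split? user_id ":").getD [user_id]).headD ""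
  let localpart := String.ofList (first.toList.dropWhile (· == '@'))
  if ¬ PySem.Str.startswith localpart "_" then "Matrix"
  else
    let e := PySem.Str.findFrom localpart "_" 1
    if e = -1 then "Matrix"
    else PySem.Dict.getD pvPlatforms (PySem.Str.slice localpart (some 1) (some e)) "Matrix"

-- ===== PRECONDITION & SPEC =====
def Spec_platform_label_py (user_id : String) (out : String) : Prop := out = platform_label_py_alt user_id
instance (user_id : String) (out : String) : Decidable (Spec_platform_label_py user_id out) := by unfold Spec_platform_label_py; infer_instance

-- ===== CLAIM (what is proved, stated in full; the proofs are below) =====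
def Claim_equal_platform_label_py : Prop := ∀ (user_id : String), Dom_platform_label_py user_id → Spec_platform_label_py user_id (platform_label_py user_id)

-- ===== LEMMAS AND PROOFS =====

lemma singleton_prefix {a : Char} {l : List Char} : [a] <+: l ↔ l.head? = some a := by
  cases l <;> simp [List.cons_prefix_cons, eq_comm]

lemma singleton_infix {a : Char} {l : List Char} : [a] <:+: l ↔ a ∈ l := by
  constructor
  · intro h; exact h.subset (by simp)
  · intro h; obtain ⟨u, v, rfl⟩ := List.append_of_mem h; exact ⟨u, v, by simp⟩

lemma key_iff {p t r : List Char} {n : Nat}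
    (hp : '_' ∉ p)
    (hd : t.drop n = '_' :: r)
    (ht : '_' ∉ t.take n) :
    (p ++ ['_']) <+: t ↔ t.take n = p := by
  have hn : n < t.length := by
    have := congrArg List.length hd
    simp at this; omega
  constructor
  · rintro ⟨r', hr'⟩
    -- t = p ++ '_' :: r'
    have htt : t = p ++ '_' :: r' := by rw [← hr']; simp
    rcases lt_trichotomy n p.length with h | h | h
    · exfalso
      have : t[n]? = some '_' := by
        have := congrArg List.head? hd
        rwa [List.head?_drop] at this
      rw [htt, List.getElem?_append_left (by omega)] at this
      exact hp (List.mem_of_getElem? this)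
    · rw [htt, h, List.take_left]
    · exfalso
      have hg : t[p.length]? = some '_' := by
        rw [htt, List.getElem?_append_right (le_refl _)]
        simp
      have : '_' ∈ t.take n := by
        rw [List.mem_iff_getElem?]
        exact ⟨p.length, by rwa [List.getElem?_take_of_lt h]⟩
      exact ht this
  · intro hk
    have hnp : n = p.length := by
      have := congrArg List.length hk
      simpa [Nat.min_eq_left (Nat.le_of_lt hn)] using this
    refine ⟨r, ?_⟩
    calc p ++ ['_'] ++ r = p ++ '_' :: r := by simp
    _ = t.take n ++ t.drop n := by rw [hk, hd]
    _ = t := List.take_append_drop n t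

set_option maxRecDepth 8192 in
lemma platforms_getD (k : String) :
  PySem.Dict.getD pvPlatforms k "Matrix" =
    if k = "discord" then "Discord" else if k = "telegram" then "Telegram"
    else if k = "signal" then "Signal" else if k = "whatsapp" then "WhatsApp" else "Matrix" := by
  have hi : pvPlatforms.items =
      [("discord","Discord"),("telegram","Telegram"),("signal","Signal"),("whatsapp","WhatsApp")] := by
    decide
  by_cases h1 : k = "discord"
  · subst h1; decide
  by_cases h2 : k = "telegram"
  · subst h2; decide
  by_cases h3 : k = "signal"
  · subst h3; decide
  by_cases h4 : k = "whatsapp"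
  · subst h4; decide
  simp only [PySem.Dict.getD, PySem.Dict.get?, hi, List.find?, if_neg h1, if_neg h2, if_neg h3, if_neg h4]
  simp [beq_eq_false_iff_ne.mpr (Ne.symm h1), beq_eq_false_iff_ne.mpr (Ne.symm h2),
        beq_eq_false_iff_ne.mpr (Ne.symm h3), beq_eq_false_iff_ne.mpr (Ne.symm h4)]

-- startswith with an underscore-delimited word, characterised by take/drop at the find position
lemma sw_iff (s : String) {t r : List Char} {n : Nat} (w : String) (hw : '_' ∉ w.toList)
    (hs : s.toList = '_' :: t)
    (hd : t.drop n = '_' :: r)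
    (ht : '_' ∉ t.take n) :
    PySem.Str.startswith s (String.ofList ('_' :: (w.toList ++ ['_']))) = true ↔ t.take n = w.toList := by
  rw [PySem.Str.startswith_eq, PySem.Chars.startswith_iff, hs, String.toList_ofList,
      List.cons_prefix_cons]
  simp only [true_and]
  exact key_iff hw hd ht

lemma tail_eq (s : String) :
    (if PySem.Str.startswith s "_discord_" then "Discord"
     else if PySem.Str.startswith s "_telegram_" then "Telegram"
     else if PySem.Str.startswith s "_signal_" then "Signal"
     else if PySem.Str.startswith s "_whatsapp_" then "WhatsApp"
     else "Matrix")
    = (if ¬ PySem.Str.startswith s "_" then "Matrix"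
       else if PySem.Str.findFrom s "_" 1 = -1 then "Matrix"
       else PySem.Dict.getD pvPlatforms
              (PySem.Str.slice s (some 1) (some (PySem.Str.findFrom s "_" 1))) "Matrix") := by
  by_cases h0 : PySem.Str.startswith s "_" = true
  · obtain ⟨t, hs⟩ : ∃ t, s.toList = '_' :: t := by
      have := (PySem.Chars.startswith_iff s.toList "_".toList).mp
        (by rw [← PySem.Str.startswith_eq]; exact h0)
      obtain ⟨t, ht⟩ := this
      exact ⟨t, by rw [← ht]; rfl⟩
    have hlen : 1 ≤ s.toList.length := by rw [hs]; simp
    have hff : PySem.Str.findFrom s "_" 1 =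
        (if PySem.Chars.find t ['_'] = -1 then -1 else 1 + PySem.Chars.find t ['_']) := by
      rw [PySem.Str.findFrom_eq]
      have := PySem.Chars.findFrom_natCast s.toList "_".toList 1 hlen
      simpa [hs] using this
    by_cases hf : PySem.Chars.find t ['_'] = -1
    · -- no second underscore: both sides "Matrix"
      have hmem : '_' ∉ t := by
        intro hm
        exact (PySem.Chars.find_eq_neg_one_iff t ['_']).mp hf (singleton_infix.mpr hm)
      have nosw : ∀ (w : String), '_' ∈ w.toList.tail →
          ¬ PySem.Str.startswith s w = true := by
        intro w hwmem hsw
        rw [PySem.Str.startswith_eq, PySem.Chars.startswith_iff, hs] at hsw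
        apply hmem
        cases hw : w.toList with
        | nil => rw [hw] at hwmem; simp at hwmem
        | cons c cs =>
          rw [hw] at hsw hwmem
          rw [List.cons_prefix_cons] at hsw
          exact hsw.2.subset (by simpa using hwmem)
      rw [if_neg (nosw "_discord_" (by decide)), if_neg (nosw "_telegram_" (by decide)),
          if_neg (nosw "_signal_" (by decide)), if_neg (nosw "_whatsapp_" (by decide)),
          if_neg (not_not_intro h0), if_pos (show PySem.Str.findFrom s "_" 1 = -1 by rw [hff]; simp [hf])]
    · -- a second underscore exists at position 1+n in the localpart
      have hge : 0 ≤ PySem.Chars.find t ['_'] := by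
        have := PySem.Chars.neg_one_le_find t ['_']
        omega
      set n := (PySem.Chars.find t ['_']).toNat with hn
      have hfind : PySem.Chars.find t ['_'] = (n : Int) := (Int.toNat_of_nonneg hge).symm
      obtain ⟨hpre, hmin⟩ := PySem.Chars.find_spec (s := t) (sub := ['_']) hge
      obtain ⟨r, hr⟩ := hpre
      have hd : t.drop n = '_' :: r := by rw [← hr]; rfl
      have ht : '_' ∉ t.take n := by
        intro hm
        rw [List.mem_iff_getElem?] at hm
        obtain ⟨i, hi⟩ := hm
        have hilt : i < n := by
          by_contra hge2
          rw [List.getElem?_eq_none (by simp; omega)] at hi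
          simp at hi
        refine hmin i hilt ?_
        rw [singleton_prefix, List.head?_drop]
        rwa [List.getElem?_take_of_lt hilt] at hi
      have he : PySem.Str.findFrom s "_" 1 = ((1 + n : Nat) : Int) := by
        rw [hff, if_neg hf, hfind]; push_cast; ring
      have hene : ¬ PySem.Str.findFrom s "_" 1 = -1 := by rw [he]; intro h; omega
      have hkey : (PySem.Str.slice s (some 1) (some (PySem.Str.findFrom s "_" 1))).toList
          = t.take n := by
        rw [PySem.Str.toList_slice, he, hs]
        have h2 := PySem.List.slice_natCast_add (xs := ('_' :: t)) (j := 1) (n := n)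
        push_cast
        simpa using h2
      have kiff : ∀ w : String,
          (PySem.Str.slice s (some 1) (some (PySem.Str.findFrom s "_" 1))) = w
            ↔ t.take n = w.toList := by
        intro w; rw [← String.toList_inj, hkey]
      have swd := sw_iff s "discord" (by decide) hs hd ht
      have swt := sw_iff s "telegram" (by decide) hs hd ht
      have sws := sw_iff s "signal" (by decide) hs hd ht
      have sww := sw_iff s "whatsapp" (by decide) hs hd ht
      rw [show ("_discord_" : String) = String.ofList ('_' :: ("discord".toList ++ ['_'])) from rfl,
          show ("_telegram_" : String) = String.ofList ('_' :: ("telegram".toList ++ ['_'])) from rfl,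
          show ("_signal_" : String) = String.ofList ('_' :: ("signal".toList ++ ['_'])) from rfl,
          show ("_whatsapp_" : String) = String.ofList ('_' :: ("whatsapp".toList ++ ['_'])) from rfl,
          if_neg (not_not_intro h0), if_neg hene, platforms_getD]
      by_cases k1 : t.take n = "discord".toList
      · rw [if_pos (swd.mpr k1), if_pos ((kiff "discord").mpr k1)]
      rw [if_neg (fun h => k1 (swd.mp h)), if_neg (fun h => k1 ((kiff "discord").mp h))]
      by_cases k2 : t.take n = "telegram".toList
      · rw [if_pos (swt.mpr k2), if_pos ((kiff "telegram").mpr k2)]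
      rw [if_neg (fun h => k2 (swt.mp h)), if_neg (fun h => k2 ((kiff "telegram").mp h))]
      by_cases k3 : t.take n = "signal".toList
      · rw [if_pos (sws.mpr k3), if_pos ((kiff "signal").mpr k3)]
      rw [if_neg (fun h => k3 (sws.mp h)), if_neg (fun h => k3 ((kiff "signal").mp h))]
      by_cases k4 : t.take n = "whatsapp".toList
      · rw [if_pos (sww.mpr k4), if_pos ((kiff "whatsapp").mpr k4)]
      rw [if_neg (fun h => k4 (sww.mp h)), if_neg (fun h => k4 ((kiff "whatsapp").mp h))]
  · -- localpart does not start with '_': every prefix test fails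
    have no1 : ∀ (w : String), w.toList.head? = some '_' →
        ¬ PySem.Str.startswith s w = true := by
      intro w hw hsw
      rw [PySem.Str.startswith_eq, PySem.Chars.startswith_iff] at hsw
      apply h0
      rw [PySem.Str.startswith_eq, PySem.Chars.startswith_iff]
      have h1 : ['_'] <+: w.toList := singleton_prefix.mpr hw
      simpa using h1.trans hsw
    rw [if_neg (no1 "_discord_" rfl), if_neg (no1 "_telegram_" rfl),
        if_neg (no1 "_signal_" rfl), if_neg (no1 "_whatsapp_" rfl), if_pos h0]


-- ===== VERDICT (by name: the statement is the Claim_ definition above) =====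
theorem platform_label_py_spec : Claim_equal_platform_label_py := by
  intro user_id _
  show platform_label_py user_id = platform_label_py_alt user_id
  unfold platform_label_py platform_label_py_alt
  exact tail_eq _
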